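-- pv_equiv track=rewrite | github.com/hy2min/march_study | 0304/9489_고대유적.py | cnt_structure
-- ===== SOURCE A (Python) =====
-- def cnt_structure(n,m,arr):
--     max_cnt = 0
--     for i in range(n):
--         cnt = 0
--         for j in range(m):
--             if arr[i][j] == 1:
--                 cnt += 1
--                 max_cnt = max(max_cnt,cnt)
--             else:
--                 cnt = 0
--     return max_cnt
-- ===== SOURCE B (Python) =====
-- def cnt_structure(n, m, arr):
--     best = 0
--     for row in arr[:max(0, n)]:
--         seg = row[:max(0, m)]
--         L = len(seg)
--         i = 0
--         while i < L:
--             if seg[i] != 1: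
--                 i += 1
--             else:
--                 j = i
--                 while j < L and seg[j] == 1:
--                     j += 1
--                 if j - i > best:
--                     best = j - i
--                 i = j
--     return best
-- ===== Notes on version B (the rewrite author's own statement) =====
-- stated objective: alternative
-- what changed: B replaces A's per-cell reset-on-mismatch counter over index ranges with a two-pointer run-finder over clamp-sliced rows: it jumps a second pointer to the end of each maximal 1-run and compares whole run lengths against the best.
import Mathlib
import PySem

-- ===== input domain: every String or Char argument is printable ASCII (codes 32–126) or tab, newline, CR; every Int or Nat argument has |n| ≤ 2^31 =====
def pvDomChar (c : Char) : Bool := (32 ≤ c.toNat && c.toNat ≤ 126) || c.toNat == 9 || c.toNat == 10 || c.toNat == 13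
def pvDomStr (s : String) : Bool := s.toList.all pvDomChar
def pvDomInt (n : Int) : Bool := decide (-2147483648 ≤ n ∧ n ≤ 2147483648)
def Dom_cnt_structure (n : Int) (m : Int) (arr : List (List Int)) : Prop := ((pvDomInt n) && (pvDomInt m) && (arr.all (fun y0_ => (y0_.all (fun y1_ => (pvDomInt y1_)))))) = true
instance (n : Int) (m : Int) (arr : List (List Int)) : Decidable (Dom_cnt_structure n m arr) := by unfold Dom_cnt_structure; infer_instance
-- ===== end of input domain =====

-- B replaces A's reset-on-mismatch counter with a two-pointer run-finder over sliced rows (alternative decomposition, same asymptotic cost).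

-- ===== PORT A =====
def cnt_structure (n : Int) (m : Int) (arr : List (List Int)) : Int :=
  (PySem.List.pyRange 0 n 1).foldl (fun max_cnt i =>
    ((PySem.List.pyRange 0 m 1).foldl
      (fun (s : Int × Int) j =>
        if PySem.List.pyGetD (PySem.List.pyGetD arr i []) j 0 = 1 then
          (s.1 + 1, max s.2 (s.1 + 1))
        else (0, s.2))
      (0, max_cnt)).2) 0

-- ===== PORT B =====
-- inner while: 'while j < L and seg[j] == 1: j += 1'
def pvSkipOnes (seg : List Int) (L : Nat) (j : Nat) : Nat :=
  if h : j < L ∧ PySem.List.pyGetD seg (j : Int) 0 = 1 then pvSkipOnes seg L (j + 1) else j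
termination_by L - j
decreasing_by omega

theorem le_pvSkipOnes (seg : List Int) (L : Nat) (j : Nat) : j ≤ pvSkipOnes seg L j := by
  fun_induction pvSkipOnes seg L j with
  | case1 j h ih => omega
  | case2 j h => omega

theorem lt_pvSkipOnes (seg : List Int) (L : Nat) (i : Nat)
    (h1 : i < L) (h2 : PySem.List.pyGetD seg (i : Int) 0 = 1) : i < pvSkipOnes seg L i := by
  rw [pvSkipOnes]
  have := le_pvSkipOnes seg L (i + 1)
  simp only [h1, h2, and_self, dif_pos]
  omega

-- outer while over i, advancing past each maximal run of ones
def pvRowLoop (seg : List Int) (L : Nat) (i : Nat) (best : Int) : Int :=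
  if hi : i < L then
    if hx : PySem.List.pyGetD seg (i : Int) 0 ≠ 1 then
      pvRowLoop seg L (i + 1) best
    else
      pvRowLoop seg L (pvSkipOnes seg L i)
        (if ((pvSkipOnes seg L i : Int) - (i : Int)) > best then ((pvSkipOnes seg L i : Int) - (i : Int)) else best)
  else best
termination_by L - i
decreasing_by
  · omega
  · have := lt_pvSkipOnes seg L i hi (by omega)
    omega

def cnt_structure_alt (n : Int) (m : Int) (arr : List (List Int)) : Int :=
  (PySem.List.slice arr none (some (max 0 n))).foldl
    (fun best row =>
      let seg := PySem.List.slice row none (some (max 0 m))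
      pvRowLoop seg seg.length 0 best) 0

-- ===== PRECONDITION & SPEC =====
-- Pre_ is exactly the set of inputs on which the Python A returns normally (A raises IndexError
-- when m > 0 and it reaches a row index ≥ len(arr) or a column index ≥ len(row)).
def Pre_cnt_structure (n : Int) (m : Int) (arr : List (List Int)) : Prop :=
  m ≤ 0 ∨ (n ≤ (arr.length : Int) ∧ ∀ row ∈ arr.take n.toNat, m ≤ (row.length : Int))
instance (n : Int) (m : Int) (arr : List (List Int)) : Decidable (Pre_cnt_structure n m arr) := by
  unfold Pre_cnt_structure; infer_instance

def pvWitness_cnt_structure : Int × Int × List (List Int) := (2, 3, [[1, 1, 0], [0, 1, 1]])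

def Spec_cnt_structure (n : Int) (m : Int) (arr : List (List Int)) (out : Int) : Prop := out = cnt_structure_alt n m arr
instance (n : Int) (m : Int) (arr : List (List Int)) (out : Int) : Decidable (Spec_cnt_structure n m arr out) := by unfold Spec_cnt_structure; infer_instance

-- ===== CLAIM (what is proved, stated in full; the proofs are below) =====
def Claim_equal_cnt_structure : Prop := ∀ (n : Int) (m : Int) (arr : List (List Int)), Dom_cnt_structure n m arr → Pre_cnt_structure n m arr → Spec_cnt_structure n m arr (cnt_structure n m arr)

-- ===== LEMMAS AND PROOFS =====

-- the common specification value: gRun c xs = max over (c + leading run) and all later runs of ones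
def gRun : Int → List Int → Int
  | c, [] => c
  | c, x :: xs => if x = 1 then gRun (c + 1) xs else max c (gRun 0 xs)

def leadOnes : List Int → Nat
  | [] => 0
  | x :: xs => if x = 1 then leadOnes xs + 1 else 0

theorem le_gRun (xs : List Int) : ∀ c : Int, c ≤ gRun c xs := by
  induction xs with
  | nil => intro c; simp [gRun]
  | cons x xs ih =>
    intro c
    simp only [gRun]
    split
    · exact le_trans (by omega) (ih (c + 1))
    · exact le_max_left _ _

theorem gRun_nonneg (xs : List Int) (c : Int) (hc : 0 ≤ c) : 0 ≤ gRun c xs :=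
  le_trans hc (le_gRun xs c)

theorem leadOnes_le_length (xs : List Int) : leadOnes xs ≤ xs.length := by
  induction xs with
  | nil => simp [leadOnes]
  | cons x xs ih => simp only [leadOnes, List.length_cons]; split <;> omega

theorem gRun_lead (xs : List Int) : ∀ c : Int, 0 ≤ c →
    gRun c xs = max (c + leadOnes xs) (gRun 0 (xs.drop (leadOnes xs))) := by
  induction xs with
  | nil =>
    intro c hc
    simp [gRun, leadOnes]
    omega
  | cons x xs ih =>
    intro c hc
    by_cases hx : x = 1
    · subst hx
      simp only [gRun, leadOnes, if_true]
      rw [ih (c + 1) (by omega)]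
      have : (((leadOnes xs + 1 : Nat)) : Int) = (leadOnes xs : Int) + 1 := by push_cast; ring
      rw [this]
      have hdrop : ((1 : Int) :: xs).drop (leadOnes xs + 1) = xs.drop (leadOnes xs) := by
        simp [List.drop_succ_cons]
      rw [hdrop]
      congr 1
      ring
    · simp only [gRun, leadOnes, hx, if_false]
      simp only [List.drop_zero, Nat.cast_zero, add_zero]
      have h0 : gRun 0 (x :: xs) = max (0 : Int) (gRun 0 xs) := by simp [gRun, hx]
      rw [h0]
      have := gRun_nonneg xs 0 (by omega)
      rw [max_eq_right this]

-- A's inner scan, characterised by gRun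
theorem foldl_stepA (xs : List Int) : ∀ (c mc : Int), 0 ≤ c → c ≤ mc →
    (xs.foldl (fun (s : Int × Int) x =>
      if x = 1 then (s.1 + 1, max s.2 (s.1 + 1)) else (0, s.2)) (c, mc)).2
    = max mc (gRun c xs) := by
  induction xs with
  | nil => intro c mc h0 hle; simp [gRun]; omega
  | cons x xs ih =>
    intro c mc h0 hle
    by_cases hx : x = 1
    · simp only [List.foldl_cons, hx, if_true, gRun]
      rw [ih (c + 1) (max mc (c + 1)) (by omega) (le_max_right _ _)]
      have hG : c + 1 ≤ gRun (c + 1) xs := le_gRun xs (c + 1)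
      rw [max_assoc, max_eq_right hG]
    · simp only [List.foldl_cons, hx, if_false, gRun]
      rw [ih 0 mc (by omega) (by omega)]
      rw [← max_assoc, max_eq_left hle]

-- B's inner while loops, characterised by leadOnes / gRun
theorem pvSkipOnes_eq (seg : List Int) : ∀ j, j ≤ seg.length →
    pvSkipOnes seg seg.length j = j + leadOnes (seg.drop j) := by
  intro j
  fun_induction pvSkipOnes seg seg.length j with
  | case1 j h ih =>
    intro hj
    obtain ⟨hjL, hx⟩ := h
    have hv : seg[j] = 1 := by
      rw [PySem.List.pyGetD_natCast] at hx
      rwa [List.getD_eq_getElem _ _ hjL] at hx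
    rw [ih (by omega)]
    rw [List.drop_eq_getElem_cons hjL]
    simp only [leadOnes, hv, if_true]
    omega
  | case2 j h =>
    intro _hj
    by_cases hjL : j < seg.length
    · have hx : ¬ PySem.List.pyGetD seg (j : Int) 0 = 1 := by tauto
      rw [PySem.List.pyGetD_natCast, List.getD_eq_getElem _ _ hjL] at hx
      rw [List.drop_eq_getElem_cons hjL]
      simp [leadOnes, hx]
    · have : j = seg.length := by omega
      subst this
      simp [leadOnes]

theorem pvRowLoop_eq (seg : List Int) : ∀ i (best : Int), i ≤ seg.length → 0 ≤ best →
    pvRowLoop seg seg.length i best = max best (gRun 0 (seg.drop i)) := by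
  intro i best
  fun_induction pvRowLoop seg seg.length i best with
  | case1 i best hi hx ih =>
    intro hiL hb
    rw [ih (by omega) hb]
    rw [PySem.List.pyGetD_natCast, List.getD_eq_getElem _ _ hi] at hx
    rw [List.drop_eq_getElem_cons hi]
    have h0 : gRun 0 (seg[i] :: seg.drop (i + 1)) = max (0 : Int) (gRun 0 (seg.drop (i + 1))) := by
      simp [gRun, hx]
    rw [h0, max_eq_right (gRun_nonneg _ 0 (by omega))]
  | case2 i best hi hx ih =>
    intro hiL hb
    have hx1 : PySem.List.pyGetD seg (i : Int) 0 = 1 := by tauto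
    have hskip : pvSkipOnes seg seg.length i = i + leadOnes (seg.drop i) := pvSkipOnes_eq seg i hiL
    have hlead : leadOnes (seg.drop i) ≤ seg.length - i := by
      have := leadOnes_le_length (seg.drop i)
      simp [List.length_drop] at this
      omega
    have hle2 : pvSkipOnes seg seg.length i ≤ seg.length := by omega
    set k : Nat := leadOnes (seg.drop i) with hk
    have hbest' : (0 : Int) ≤ (if ((pvSkipOnes seg seg.length i : Int) - (i : Int)) > best
        then ((pvSkipOnes seg seg.length i : Int) - (i : Int)) else best) := by
      split <;> omega
    simp only [dite_eq_ite] at ih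
    rw [ih hle2 hbest']
    have hdd : seg.drop (pvSkipOnes seg seg.length i) = (seg.drop i).drop k := by
      rw [List.drop_drop, hskip]
    rw [hdd]
    have hglead : gRun 0 (seg.drop i) = max ((k : Nat) : Int) (gRun 0 ((seg.drop i).drop k)) := by
      have := gRun_lead (seg.drop i) 0 (by omega)
      simpa using this
    rw [hglead]
    have hcast : (pvSkipOnes seg seg.length i : Int) - (i : Int) = (k : Int) := by
      rw [hskip]; push_cast; omega
    rw [hcast]
    have hif : (if ((k : Int)) > best then ((k : Int)) else best) = max best (k : Int) := by
      split <;> omega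
    rw [hif, max_assoc]
  | case3 i best hi =>
    intro hiL hb
    have : i = seg.length := by omega
    subst this
    simp [gRun]
    omega

-- A's inner index loop equals a fold over the sliced row
theorem innerA (row : List Int) (m : Int) (hm : 0 ≤ m) (hlen : m ≤ (row.length : Int)) (mc : Int) :
    ((PySem.List.pyRange 0 m 1).foldl
      (fun (s : Int × Int) j =>
        if PySem.List.pyGetD row j 0 = 1 then (s.1 + 1, max s.2 (s.1 + 1)) else (0, s.2))
      (0, mc))
    = ((row.take m.toNat).foldl
      (fun (s : Int × Int) x =>
        if x = 1 then (s.1 + 1, max s.2 (s.1 + 1)) else (0, s.2))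
      (0, mc)) := by
  have hlt : ((row.take m.toNat).length : Int) = m := by
    simp [List.length_take]
    omega
  have hcongr : (PySem.List.pyRange 0 m 1).foldl
      (fun (s : Int × Int) j =>
        if PySem.List.pyGetD row j 0 = 1 then (s.1 + 1, max s.2 (s.1 + 1)) else (0, s.2))
      (0, mc)
      = (PySem.List.pyRange 0 m 1).foldl
      (fun (s : Int × Int) j =>
        if PySem.List.pyGetD (row.take m.toNat) j 0 = 1 then (s.1 + 1, max s.2 (s.1 + 1)) else (0, s.2))
      (0, mc) := by
    apply PySem.List.foldl_congr_mem
    intro acc j hjmem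
    have hj : 0 ≤ j ∧ j < m := (PySem.List.mem_pyRange_one.mp hjmem).imp id id
    have hj2 : j < (row.length : Int) := lt_of_lt_of_le hj.2 hlen
    have e1 : PySem.List.pyGetD row j 0 = row[j.toNat] :=
      PySem.List.pyGetD_eq_getElem row 0 hj.1 hj2
    have hjt : j.toNat < (row.take m.toNat).length := by
      simp [List.length_take]; omega
    have e2 : PySem.List.pyGetD (row.take m.toNat) j 0 = (row.take m.toNat)[j.toNat] :=
      PySem.List.pyGetD_eq_getElem _ 0 hj.1 (by omega)
    have e3 : (row.take m.toNat)[j.toNat] = row[j.toNat] := by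
      rw [List.getElem_take]
    rw [e1, e2, e3]
  have hb := PySem.List.foldl_pyRange_zero_pyGetD' (row.take m.toNat) 0
    (fun (s : Int × Int) x => if x = 1 then (s.1 + 1, max s.2 (s.1 + 1)) else (0, s.2)) (0, mc)
  rw [hlt] at hb
  rw [hcongr]
  exact hb

-- both row computations fold to the same value, with the 0 ≤ acc invariant
theorem outer_eq (T : Nat) (rows : List (List Int)) : ∀ acc : Int, 0 ≤ acc →
    rows.foldl (fun mc row =>
        ((row.take T).foldl
          (fun (s : Int × Int) x =>
            if x = 1 then (s.1 + 1, max s.2 (s.1 + 1)) else (0, s.2)) (0, mc)).2) acc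
    = rows.foldl (fun best row =>
        pvRowLoop (row.take T) (row.take T).length 0 best) acc := by
  induction rows with
  | nil => intro acc _; rfl
  | cons row rows ih =>
    intro acc hacc
    simp only [List.foldl_cons]
    have hA : ((row.take T).foldl
        (fun (s : Int × Int) x =>
          if x = 1 then (s.1 + 1, max s.2 (s.1 + 1)) else (0, s.2)) (0, acc)).2
        = max acc (gRun 0 (row.take T)) := foldl_stepA _ 0 acc (by omega) hacc
    have hB : pvRowLoop (row.take T) (row.take T).length 0 acc
        = max acc (gRun 0 (row.take T)) := by
      rw [pvRowLoop_eq (row.take T) 0 acc (by omega) hacc]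
      simp
    rw [hA, hB]
    exact ih _ (le_trans hacc (le_max_left _ _))

theorem foldl_const {α : Type} (l : List α) (acc : Int) :
    l.foldl (fun (a : Int) (_ : α) => a) acc = acc := by
  induction l generalizing acc with
  | nil => rfl
  | cons x xs ih => simp [List.foldl_cons, ih]

-- ===== VERDICT (by name: the statement is the Claim_ definition above) =====
theorem cnt_structure_spec : Claim_equal_cnt_structure := by
  intro n m arr _hdom hpre
  show cnt_structure n m arr = cnt_structure_alt n m arr
  unfold cnt_structure cnt_structure_alt
  rw [PySem.List.slice_to arr (le_max_left 0 n)]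
  by_cases hm0 : m ≤ 0
  · -- m ≤ 0: A's inner range is empty and B's column slice is empty; both sides are 0
    have hr0 : PySem.List.pyRange 0 m 1 = ([] : List Int) := PySem.List.pyRange_one_eq_nil hm0
    simp only [hr0, List.foldl_nil]
    rw [foldl_const]
    have hmx : max (0 : Int) m = 0 := by omega
    simp only [hmx]
    have hbody : ∀ (best : Int) (row : List Int),
        (let seg := PySem.List.slice row none (some 0); pvRowLoop seg seg.length 0 best) = best := by
      intro best row
      have : PySem.List.slice row none (some 0) = row.take ((0 : Int)).toNat :=
        PySem.List.slice_to row (by omega)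
      simp only [this]
      rw [pvRowLoop]
      simp
    have : (arr.take (max (0 : Int) n).toNat).foldl
        (fun best row => let seg := PySem.List.slice row none (some 0); pvRowLoop seg seg.length 0 best) 0
        = (arr.take (max (0 : Int) n).toNat).foldl (fun (best : Int) (_ : List Int) => best) 0 := by
      apply PySem.List.foldl_congr_mem
      intro acc row _
      exact hbody acc row
    rw [this, foldl_const]
  · -- general case: 0 < m, so the second disjunct of Pre_ holds
    obtain ⟨hlen, hrows⟩ : n ≤ (arr.length : Int) ∧ ∀ row ∈ arr.take n.toNat, m ≤ (row.length : Int) := by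
      rcases hpre with h | h
      · omega
      · exact h
    have hm : 0 ≤ m := by omega
    have hmx : max (0 : Int) m = m := by omega
    simp only [hmx]
    have hTn : (max (0 : Int) n).toNat = n.toNat := by omega
    rw [hTn]
    -- B side: slice each row
    have hB : (arr.take n.toNat).foldl
        (fun best row => let seg := PySem.List.slice row none (some m); pvRowLoop seg seg.length 0 best) 0
        = (arr.take n.toNat).foldl
        (fun best row => pvRowLoop (row.take m.toNat) (row.take m.toNat).length 0 best) 0 := by
      apply PySem.List.foldl_congr_mem
      intro acc row _
      simp only [PySem.List.slice_to row hm]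
    rw [hB]
    -- A side: replace arr-indexing by indexing into arr.take n.toNat
    have hlt : ((arr.take n.toNat).length : Int) = (n.toNat : Int) := by
      simp [List.length_take]
      omega
    have hAc : (PySem.List.pyRange 0 n 1).foldl (fun max_cnt i =>
        ((PySem.List.pyRange 0 m 1).foldl
          (fun (s : Int × Int) j =>
            if PySem.List.pyGetD (PySem.List.pyGetD arr i []) j 0 = 1 then
              (s.1 + 1, max s.2 (s.1 + 1))
            else (0, s.2)) (0, max_cnt)).2) 0
        = (PySem.List.pyRange 0 n 1).foldl (fun max_cnt i =>
        ((PySem.List.pyRange 0 m 1).foldl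
          (fun (s : Int × Int) j =>
            if PySem.List.pyGetD (PySem.List.pyGetD (arr.take n.toNat) i []) j 0 = 1 then
              (s.1 + 1, max s.2 (s.1 + 1))
            else (0, s.2)) (0, max_cnt)).2) 0 := by
      apply PySem.List.foldl_congr_mem
      intro acc i himem
      have hi : 0 ≤ i ∧ i < n := (PySem.List.mem_pyRange_one.mp himem).imp id id
      have e1 : PySem.List.pyGetD arr i [] = arr[i.toNat]'(by omega) :=
        PySem.List.pyGetD_eq_getElem arr [] hi.1 (by omega)
      have e2 : PySem.List.pyGetD (arr.take n.toNat) i [] = (arr.take n.toNat)[i.toNat]'(by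
          simp [List.length_take]; omega) :=
        PySem.List.pyGetD_eq_getElem _ [] hi.1 (by omega)
      have e3 : (arr.take n.toNat)[i.toNat]'(by simp [List.length_take]; omega) = arr[i.toNat]'(by omega) := by
        rw [List.getElem_take]
      rw [e1, e2, e3]
    have hrange : PySem.List.pyRange 0 n 1 = PySem.List.pyRange 0 ((arr.take n.toNat).length : Int) 1 := by
      by_cases h : 0 ≤ n
      · rw [hlt]
        congr 1
        omega
      · have h0 : n.toNat = 0 := by omega
        rw [PySem.List.pyRange_one_eq_nil (by omega),
          PySem.List.pyRange_one_eq_nil (by simp [h0])]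
    have hbridge := PySem.List.foldl_pyRange_zero_pyGetD' (arr.take n.toNat) []
      (fun max_cnt row =>
        ((PySem.List.pyRange 0 m 1).foldl
          (fun (s : Int × Int) j =>
            if PySem.List.pyGetD row j 0 = 1 then (s.1 + 1, max s.2 (s.1 + 1)) else (0, s.2))
          (0, max_cnt)).2) 0
    rw [hAc, hrange, hbridge]
    -- per-row: A's index loop over the row = fold over the sliced row, then outer_eq
    have hRow : (arr.take n.toNat).foldl
        (fun max_cnt row =>
          ((PySem.List.pyRange 0 m 1).foldl
            (fun (s : Int × Int) j =>
              if PySem.List.pyGetD row j 0 = 1 then (s.1 + 1, max s.2 (s.1 + 1)) else (0, s.2))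
            (0, max_cnt)).2) 0
        = (arr.take n.toNat).foldl
        (fun mc row =>
          ((row.take m.toNat).foldl
            (fun (s : Int × Int) x =>
              if x = 1 then (s.1 + 1, max s.2 (s.1 + 1)) else (0, s.2)) (0, mc)).2) 0 := by
      apply PySem.List.foldl_congr_mem
      intro acc row hrow
      rw [innerA row m hm (hrows row hrow) acc]
    rw [hRow]
    exact outer_eq m.toNat (arr.take n.toNat) 0 (by omega)
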